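-- pv_equiv track=rewrite | github.com/asifreal/cluener | seq2entity.py | get_entity_oi
-- ===== SOURCE A (Python) =====
-- def get_entity_oi(seq, id2label):
--     """Gets entities from sequence.
--     note: IO
--     Args:
--         seq (list): sequence of labels.
--     Returns:
--         list: list of (chunk_type, chunk_start, chunk_end).
--     Example:
--         seq = ['I', 'I', 'O', 'I']
--         get_entity_bio(seq)
--         #output
--         [['', 0,1], ['', 3, 3]]
--     """
--     chunks = []
--     chunk = [-1, -1, -1]
--     if not isinstance(seq[0], str):
--         inp = []
--         for i in range(len(seq)):
--             inp.append(id2label[seq[i]])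
--         seq = inp
--     i, j = 0, 0
--     while i < len(seq):
--         if seq[i].startswith('I'):
--             j = i
--             while j < len(seq) and seq[j] == seq[i]:
--                 j+=1
--             chunk = ['', i, j-1]
--             chunks.append(chunk)
--             i = j
--         else:
--             i+=1
--     return chunks
-- ===== SOURCE B (Python) =====
-- def get_entity_oi(seq, id2label):
--     if not isinstance(seq[0], str):
--         seq = [id2label[x] for x in seq]
--     chunks = []
--     start = None
--     prev = None
--     for idx, lab in enumerate(seq):
--         if prev is not None and lab != prev:
--             chunks.append(['', start, idx - 1])
--             start = None
--             prev = None
--         if prev is None and lab.startswith('I'):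
--             start = idx
--             prev = lab
--     if prev is not None:
--         chunks.append(['', start, len(seq) - 1])
--     return chunks
-- ===== Notes on version B (the rewrite author's own statement) =====
-- stated objective: alternative
-- what changed: Replaced A's index-based outer/inner while loops (inner scan finds each run's end, outer jumps to it) by a single pass over enumerate(seq) that carries an open-run state (start index, run label) and closes a chunk whenever the label changes or the sequence ends.
import Mathlib
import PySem

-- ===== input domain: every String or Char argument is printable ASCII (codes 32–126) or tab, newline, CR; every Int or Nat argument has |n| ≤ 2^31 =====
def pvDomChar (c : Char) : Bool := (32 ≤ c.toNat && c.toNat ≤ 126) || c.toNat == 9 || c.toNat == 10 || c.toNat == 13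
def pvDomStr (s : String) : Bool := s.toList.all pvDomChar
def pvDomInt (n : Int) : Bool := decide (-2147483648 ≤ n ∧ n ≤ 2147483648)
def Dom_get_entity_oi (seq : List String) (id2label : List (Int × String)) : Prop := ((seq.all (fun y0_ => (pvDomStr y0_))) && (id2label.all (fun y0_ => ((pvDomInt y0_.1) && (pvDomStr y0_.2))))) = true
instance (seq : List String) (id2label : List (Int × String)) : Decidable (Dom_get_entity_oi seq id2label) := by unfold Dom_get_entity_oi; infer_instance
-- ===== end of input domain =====

-- B replaces A's nested while-loop run scanning by a single enumerate pass with an open-run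
-- accumulator (alternative decomposition, same cost).


-- ===== PORT A =====
-- inner while: 'while j < len(seq) and seq[j] == seq[i]: j += 1' (lab = seq[i])
def aInner (seq : List String) (lab : String) (j : Nat) : Nat :=
  if h : j < seq.length ∧ seq.getD j "" = lab then aInner seq lab (j + 1) else j
termination_by seq.length - j
decreasing_by omega

theorem aInner_ge (seq : List String) (lab : String) (j : Nat) : j ≤ aInner seq lab j := by
  unfold aInner
  split
  · have := aInner_ge seq lab (j + 1); omega
  · omega
termination_by seq.length - j
decreasing_by omega

theorem aInner_gt (seq : List String) (lab : String) (i : Nat)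
    (h : i < seq.length) (he : seq.getD i "" = lab) : i < aInner seq lab i := by
  unfold aInner
  rw [dif_pos ⟨h, he⟩]
  have := aInner_ge seq lab (i + 1); omega

-- outer while over index i, chunks is the Python accumulator list
def aLoop (seq : List String) (chunks : List (String × Int × Int)) (i : Nat) :
    List (String × Int × Int) :=
  if h : i < seq.length then
    if (seq.getD i "").startsWith "I" then
      let j := aInner seq (seq.getD i "") i
      aLoop seq (chunks ++ [("", (i : Int), (j : Int) - 1)]) j
    else aLoop seq chunks (i + 1)
  else chunks
termination_by seq.length - i
decreasing_by
  · have := aInner_gt seq (seq.getD i "") i h rfl; omega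
  · omega

-- the 'isinstance(seq[0], str)' branch is statically true here (seq : List String), so the
-- id2label conversion loop is dead code; seq[0] raising on [] is excluded by Pre_.
def get_entity_oi (seq : List String) (id2label : List (Int × String)) : List (String × Int × Int) :=
  aLoop seq [] 0

-- ===== PORT B =====
-- one step of B's for-loop: close the open run if the label changed, then open on an 'I' label
def bStep (st : List (String × Int × Int) × Option (Int × String)) (p : Int × String) :
    List (String × Int × Int) × Option (Int × String) :=
  let st1 :=
    match st.2 with
    | some (start, prev) =>
        if p.2 ≠ prev then (st.1 ++ [("", start, p.1 - 1)], (none : Option (Int × String))) else st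
    | none => st
  match st1.2 with
  | none => if p.2.startsWith "I" then (st1.1, some (p.1, p.2)) else st1
  | some _ => st1

def get_entity_oi_alt (seq : List String) (id2label : List (Int × String)) :
    List (String × Int × Int) :=
  let st := (PySem.List.enumerate seq).foldl bStep ([], none)
  match st.2 with
  | some (start, _) => st.1 ++ [("", start, (seq.length : Int) - 1)]
  | none => st.1

-- ===== PRECONDITION & SPEC =====
-- Pre_ excludes only the empty seq, on which Python A raises IndexError at seq[0].
def Pre_get_entity_oi (seq : List String) (id2label : List (Int × String)) : Prop := seq ≠ []
instance (seq : List String) (id2label : List (Int × String)) : Decidable (Pre_get_entity_oi seq id2label) := by unfold Pre_get_entity_oi; infer_instance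

def pvWitness_get_entity_oi : List String × (List (Int × String)) := (["I", "I", "O", "I"], [])

def Spec_get_entity_oi (seq : List String) (id2label : List (Int × String)) (out : List (String × Int × Int)) : Prop := out = get_entity_oi_alt seq id2label
instance (seq : List String) (id2label : List (Int × String)) (out : List (String × Int × Int)) : Decidable (Spec_get_entity_oi seq id2label out) := by unfold Spec_get_entity_oi; infer_instance

-- ===== CLAIM (what is proved, stated in full; the proofs are below) =====
def Claim_equal_get_entity_oi : Prop := ∀ (seq : List String) (id2label : List (Int × String)), Dom_get_entity_oi seq id2label → Pre_get_entity_oi seq id2label → Spec_get_entity_oi seq id2label (get_entity_oi seq id2label)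

-- ===== LEMMAS AND PROOFS =====

-- canonical run decomposition both ports are reduced to
def takeLen (lab : String) (l : List String) : Nat := (l.takeWhile (fun x => x == lab)).length

def chunksSpec (l : List String) (i : Int) : List (String × Int × Int) :=
  match l with
  | [] => []
  | lab :: rest =>
    if lab.startsWith "I" then
      ("", i, i + (takeLen lab rest : Int)) ::
        chunksSpec (rest.drop (takeLen lab rest)) (i + (takeLen lab rest : Int) + 1)
    else chunksSpec rest (i + 1)
termination_by l.length
decreasing_by
  all_goals simp

-- A-side: the inner while computes the run length
theorem aInner_eq (seq : List String) (lab : String) (j : Nat) :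
    aInner seq lab j = j + takeLen lab (seq.drop j) := by
  unfold aInner
  split
  · rename_i h
    obtain ⟨hj, he⟩ := h
    have hj? : seq[j]? = some seq[j] := List.getElem?_eq_getElem hj
    have hjl : seq[j] = lab := by simpa [List.getD, hj?] using he
    have hb : (seq[j] == lab) = true := beq_iff_eq.mpr hjl
    rw [aInner_eq seq lab (j + 1), List.drop_eq_getElem_cons hj]
    simp [takeLen, List.takeWhile, hb]
    omega
  · rename_i h
    rcases Nat.lt_or_ge j seq.length with hj | hj
    · have hj? : seq[j]? = some seq[j] := List.getElem?_eq_getElem hj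
      have hjl : seq[j] ≠ lab := by
        intro hc; exact h ⟨hj, by simp [List.getD, hj?, hc]⟩
      have hb : (seq[j] == lab) = false := beq_eq_false_iff_ne.mpr hjl
      rw [List.drop_eq_getElem_cons hj]
      simp [takeLen, List.takeWhile, hb]
    · rw [List.drop_eq_nil_of_le hj]
      simp [takeLen]
termination_by seq.length - j
decreasing_by omega

-- A-side: the outer while equals the canonical spec on the remaining suffix
theorem aLoop_eq (seq : List String) (chunks : List (String × Int × Int)) (i : Nat) :
    aLoop seq chunks i = chunks ++ chunksSpec (seq.drop i) (i : Int) := by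
  unfold aLoop
  split
  · rename_i hi
    have hi? : seq[i]? = some seq[i] := List.getElem?_eq_getElem hi
    have hgl : seq.getD i "" = seq[i] := by simp [List.getD, hi?]
    have hdrop : seq.drop i = seq[i] :: seq.drop (i + 1) := List.drop_eq_getElem_cons hi
    rw [hgl]
    split
    · rename_i hI
      show aLoop seq (chunks ++ [("", (i : Int), (aInner seq seq[i] i : Int) - 1)])
          (aInner seq seq[i] i) = chunks ++ chunksSpec (seq.drop i) (i : Int)
      have hin : aInner seq seq[i] i = i + 1 + takeLen seq[i] (seq.drop (i + 1)) := by
        rw [aInner_eq, hdrop]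
        simp [takeLen, List.takeWhile]
        omega
      rw [aLoop_eq seq _ (aInner seq seq[i] i), hdrop, chunksSpec, if_pos hI, hin]
      have hdd : (seq.drop (i + 1)).drop (takeLen seq[i] (seq.drop (i + 1)))
          = seq.drop (i + 1 + takeLen seq[i] (seq.drop (i + 1))) := by
        rw [List.drop_drop, Nat.add_comm]
      have c1 : ((i + 1 + takeLen seq[i] (seq.drop (i + 1)) : Nat) : Int) - 1
          = (i : Int) + (takeLen seq[i] (seq.drop (i + 1)) : Int) := by push_cast; ring
      have c2 : ((i + 1 + takeLen seq[i] (seq.drop (i + 1)) : Nat) : Int)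
          = (i : Int) + (takeLen seq[i] (seq.drop (i + 1)) : Int) + 1 := by push_cast; ring
      rw [hdd, c1, c2]
      simp
    · rename_i hI
      rw [aLoop_eq seq chunks (i + 1), hdrop, chunksSpec, if_neg hI]
      push_cast; rfl
  · rename_i hi
    rw [List.drop_eq_nil_of_le (by omega), chunksSpec]
    simp
termination_by seq.length - i
decreasing_by
  · have := aInner_gt seq (seq.getD i "") i (by assumption) rfl
    omega
  · omega

-- B-side: finalize the fold state at end-index e
def bFin (st : List (String × Int × Int) × Option (Int × String)) (e : Int) :
    List (String × Int × Int) :=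
  match st.2 with
  | some (start, _) => st.1 ++ [("", start, e)]
  | none => st.1

theorem bStep_same (c : List (String × Int × Int)) (s : Int) (lab : String) (p : Int × String)
    (h : p.2 = lab) : bStep (c, some (s, lab)) p = (c, some (s, lab)) := by
  simp [bStep, h]

theorem bStep_close (c : List (String × Int × Int)) (s : Int) (lab : String) (p : Int × String)
    (h : p.2 ≠ lab) : bStep (c, some (s, lab)) p = bStep (c ++ [("", s, p.1 - 1)], none) p := by
  simp [bStep, h]

-- the mutual induction: closed-state fold = spec, open-state fold = current chunk :: spec
mutual
theorem bMain (l : List String) (c : List (String × Int × Int)) (i : Int) :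
    bFin ((PySem.List.enumerate l i).foldl bStep (c, none)) (i + l.length - 1)
      = c ++ chunksSpec l i := by
  match l with
  | [] => simp [PySem.List.enumerate_nil, bFin, chunksSpec]
  | lab :: rest =>
    rw [PySem.List.enumerate_cons, List.foldl_cons]
    by_cases hI : lab.startsWith "I"
    · have hstep : bStep (c, none) (i, lab) = (c, some (i, lab)) := by simp [bStep, hI]
      rw [hstep, chunksSpec, if_pos hI]
      have hs := bSub rest c i lab (i + 1)
      have e1 : i + ((rest.length + 1 : Nat) : Int) - 1 = i + 1 + (rest.length : Int) - 1 := by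
        push_cast; ring
      have e2 : i + 1 + ((takeLen lab rest : Nat) : Int) - 1 = i + (takeLen lab rest : Int) := by
        ring
      have e3 : i + 1 + ((takeLen lab rest : Nat) : Int) = i + (takeLen lab rest : Int) + 1 := by
        ring
      rw [List.length_cons, e1, hs, e2, e3]
    · have hstep : bStep (c, none) (i, lab) = (c, none) := by simp [bStep, hI]
      rw [hstep, chunksSpec, if_neg hI]
      have hm := bMain rest c (i + 1)
      have e1 : i + ((rest.length + 1 : Nat) : Int) - 1 = i + 1 + (rest.length : Int) - 1 := by
        push_cast; ring
      rw [List.length_cons, e1]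
      exact hm
termination_by (l.length, 0)

theorem bSub (rest : List String) (c : List (String × Int × Int)) (s : Int) (lab : String)
    (j : Int) :
    bFin ((PySem.List.enumerate rest j).foldl bStep (c, some (s, lab))) (j + rest.length - 1)
      = c ++ ("", s, j + (takeLen lab rest : Int) - 1)
          :: chunksSpec (rest.drop (takeLen lab rest)) (j + (takeLen lab rest : Int)) := by
  match rest with
  | [] => simp [PySem.List.enumerate_nil, bFin, takeLen, chunksSpec]
  | x :: r =>
    rw [PySem.List.enumerate_cons, List.foldl_cons]
    by_cases hx : x = lab
    · rw [bStep_same c s lab (j, x) hx]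
      have hb : (x == lab) = true := by simp [hx]
      have hk : takeLen lab (x :: r) = takeLen lab r + 1 := by
        simp [takeLen, List.takeWhile, hb]
      have ih := bSub r c s lab (j + 1)
      have e1 : j + ((r.length + 1 : Nat) : Int) - 1 = j + 1 + (r.length : Int) - 1 := by
        push_cast; ring
      have h1 : j + 1 + ((takeLen lab r : Nat) : Int) - 1
          = j + ((takeLen lab r + 1 : Nat) : Int) - 1 := by push_cast; ring
      have h2 : j + 1 + ((takeLen lab r : Nat) : Int)
          = j + ((takeLen lab r + 1 : Nat) : Int) := by push_cast; ring
      rw [List.length_cons, e1, ih, hk, h1, h2, List.drop_succ_cons]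
    · rw [bStep_close c s lab (j, x) hx]
      have hb : (x == lab) = false := by simp [hx]
      have hk : takeLen lab (x :: r) = 0 := by
        simp [takeLen, List.takeWhile, hb]
      have hm := bMain (x :: r) (c ++ [("", s, j - 1)]) j
      rw [PySem.List.enumerate_cons, List.foldl_cons] at hm
      rw [hm, hk]
      simp
termination_by (rest.length, 1)
end

-- ===== VERDICT (by name: the statement is the Claim_ definition above) =====
theorem get_entity_oi_spec : Claim_equal_get_entity_oi := by
  intro seq id2label _ _
  unfold Spec_get_entity_oi get_entity_oi
  have e : get_entity_oi_alt seq id2label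
      = bFin ((PySem.List.enumerate seq 0).foldl bStep ([], none)) ((seq.length : Int) - 1) := rfl
  have hB := bMain seq [] 0
  rw [aLoop_eq, e, show ((seq.length : Int) - 1) = 0 + (seq.length : Int) - 1 by ring, hB]
  simp
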